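-- pv_equiv track=rewrite | github.com/Paolopdp/finished-school-projects | Elaborato_Python/progetto.py | get_min_max_num
-- ===== SOURCE A (Python) =====
-- def get_min_max_num(len_map):
-- 	maxc,minc=0,0
-- 	ret=sorted(len_map.values())
-- 	for k in len_map.keys():
-- 		if len_map[k]==ret[-1]:
-- 			maxc=maxc+1
-- 		elif len_map[k]==ret[0]:
-- 			minc=minc+1
-- 	return (minc,maxc)
-- ===== SOURCE B (Python) =====
-- def get_min_max_num(len_map):
--     vals = list(len_map.values())
--     if not vals:
--         return (0, 0)
--     lo = min(vals)
--     hi = max(vals)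
--     maxc = vals.count(hi)
--     minc = vals.count(lo) if lo != hi else 0
--     return (minc, maxc)
-- ===== Notes on version B (the rewrite author's own statement) =====
-- stated objective: simpler
-- what changed: Replaces A's sort of all values plus a per-key dict-lookup scan by direct min/max and two list.count passes (no sort, no key iteration), with an explicit empty guard; the all-values-equal case (min==max counts only toward max) is reproduced as in A.
import Mathlib
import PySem

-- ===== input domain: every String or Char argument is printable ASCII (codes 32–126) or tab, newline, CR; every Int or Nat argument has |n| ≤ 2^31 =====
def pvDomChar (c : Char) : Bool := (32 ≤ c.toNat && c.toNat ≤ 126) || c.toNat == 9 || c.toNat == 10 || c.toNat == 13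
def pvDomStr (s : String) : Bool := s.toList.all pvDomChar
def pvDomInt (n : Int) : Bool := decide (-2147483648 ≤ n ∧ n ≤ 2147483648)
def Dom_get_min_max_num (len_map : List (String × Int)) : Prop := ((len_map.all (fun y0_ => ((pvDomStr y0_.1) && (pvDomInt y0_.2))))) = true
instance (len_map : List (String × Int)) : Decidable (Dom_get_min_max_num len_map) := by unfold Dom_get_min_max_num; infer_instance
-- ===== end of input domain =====

-- B replaces A's sort-all-values + per-key dict-lookup scan by direct min/max and two count passes (objective: simpler).

-- ===== PORT A =====
-- ret[-1] / ret[0] are ported as pyGet? (none = IndexError, unreachable since the loop runs only when the dict is nonempty);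
-- the Option comparison `.any (v == ·)` is exact there.  Accumulator p = (minc, maxc).
def get_min_max_num (len_map : List (String × Int)) : Int × Int :=
  let d := PySem.Dict.ofList len_map
  let ret := PySem.List.sorted d.values (fun x => x) false
  let r := d.keys.foldl (fun (p : Int × Int) k =>
      if (PySem.List.pyGet? ret (-1)).any (fun v => d.getD k 0 == v) then (p.1, p.2 + 1)
      else if (PySem.List.pyGet? ret 0).any (fun v => d.getD k 0 == v) then (p.1 + 1, p.2)
      else p) ((0 : Int), (0 : Int))
  (r.1, r.2)

-- ===== PORT B =====
def get_min_max_num_alt (len_map : List (String × Int)) : Int × Int :=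
  let vals := (PySem.Dict.ofList len_map).values
  if vals.isEmpty then ((0 : Int), (0 : Int))
  else
    match PySem.List.min? vals (fun x => x), PySem.List.max? vals (fun x => x) with
    | some lo, some hi =>
        ((if lo ≠ hi then (vals.count lo : Int) else 0), (vals.count hi : Int))
    | _, _ => (0, 0)

-- ===== PRECONDITION & SPEC =====
def Spec_get_min_max_num (len_map : List (String × Int)) (out : Int × Int) : Prop := out = get_min_max_num_alt len_map
instance (len_map : List (String × Int)) (out : Int × Int) : Decidable (Spec_get_min_max_num len_map out) := by unfold Spec_get_min_max_num; infer_instance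

-- ===== CLAIM (what is proved, stated in full; the proofs are below) =====
def Claim_equal_get_min_max_num : Prop := ∀ (len_map : List (String × Int)), Dom_get_min_max_num len_map → Spec_get_min_max_num len_map (get_min_max_num len_map)

-- ===== LEMMAS AND PROOFS =====

-- the counting fold over the values, with an arbitrary accumulator
lemma foldl_minmax (vs : List Int) (lo hi : Int) (a b : Int) :
    vs.foldl (fun (p : Int × Int) v =>
        if v == hi then (p.1, p.2 + 1) else if v == lo then (p.1 + 1, p.2) else p) (a, b)
      = (a + ((vs.filter (fun v => !(v == hi))).count lo : Int), b + (vs.count hi : Int)) := by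
  induction vs generalizing a b with
  | nil => simp
  | cons v t ih =>
    rw [List.foldl_cons]
    by_cases hv : v = hi
    · rw [show (if (v == hi) = true then ((a, b).1, (a, b).2 + 1)
            else if (v == lo) = true then ((a, b).1 + 1, (a, b).2) else (a, b)) = (a, b + 1) from by
          simp [hv]]
      rw [ih, Prod.mk.injEq]
      constructor
      · simp [hv]
      · simp [hv]
        ring
    · by_cases hl : v = lo
      · have hlh : ¬ lo = hi := by rw [← hl]; exact hv
        rw [show (if (v == hi) = true then ((a, b).1, (a, b).2 + 1)
              else if (v == lo) = true then ((a, b).1 + 1, (a, b).2) else (a, b)) = (a + 1, b) from by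
            simp [hl, hlh]]
        rw [ih, Prod.mk.injEq]
        constructor
        · simp [hl, hlh]
          ring
        · simp [hv]
      · rw [show (if (v == hi) = true then ((a, b).1, (a, b).2 + 1)
              else if (v == lo) = true then ((a, b).1 + 1, (a, b).2) else (a, b)) = (a, b) from by
            simp [hv, hl]]
        rw [ih, Prod.mk.injEq]
        constructor
        · simp [hv, hl]
        · simp [hv]

lemma count_filter_ne (vs : List Int) (lo hi : Int) :
    ((vs.filter (fun v => !(v == hi))).count lo : Int)
      = if lo ≠ hi then (vs.count lo : Int) else 0 := by
  by_cases h : lo = hi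
  · subst h
    simp
    exact List.count_eq_zero.mpr (by
      intro hmem
      have := List.of_mem_filter hmem
      simp at this)
  · simp [h]

-- ===== VERDICT (by name: the statement is the Claim_ definition above) =====

theorem get_min_max_num_spec : Claim_equal_get_min_max_num := by
  intro len_map _
  unfold Spec_get_min_max_num get_min_max_num get_min_max_num_alt
  dsimp only
  have hnd : (PySem.Dict.ofList len_map).keys.Nodup := PySem.Dict.nodup_keys_ofList len_map
  generalize hD : PySem.Dict.ofList len_map = d
  rw [hD] at hnd
  by_cases hv : d.values = []
  · -- empty dict: the loop body never runs, B's guard returns (0,0)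
    have hk : d.keys = [] := by
      have : d.items = [] := by
        have := hv
        unfold PySem.Dict.values at this
        exact List.map_eq_nil_iff.mp this
      unfold PySem.Dict.keys
      simp [this]
    simp [hv, hk]
  · -- nonempty dict
    obtain ⟨lo, hmin⟩ : ∃ lo, PySem.List.min? d.values (fun x => x) = some lo := by
      cases h : PySem.List.min? d.values (fun x => x) with
      | none => exact absurd ((PySem.List.min?_eq_none_iff _ _).mp h) hv
      | some lo => exact ⟨lo, rfl⟩
    obtain ⟨hi, hmax⟩ : ∃ hi, PySem.List.max? d.values (fun x => x) = some hi := by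
      cases h : PySem.List.max? d.values (fun x => x) with
      | none => exact absurd ((PySem.List.max?_eq_none_iff _ _).mp h) hv
      | some hi => exact ⟨hi, rfl⟩
    have hloMem : lo ∈ d.values := PySem.List.min?_mem hmin
    have hhiMem : hi ∈ d.values := PySem.List.max?_mem hmax
    have hloMin : ∀ y ∈ d.values, lo ≤ y := by
      intro y hy; exact PySem.List.min?_isMin hmin y hy
    have hhiMax : ∀ y ∈ d.values, y ≤ hi := by
      intro y hy; exact PySem.List.max?_isMax hmax y hy
    generalize hret : PySem.List.sorted d.values (fun x => x) false = ret
    have hretne : ret ≠ [] := by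
      intro h; exact hv ((PySem.List.sorted_eq_nil_iff d.values (fun x => x) false).mp (hret ▸ h))
    have hmemret : ∀ y, y ∈ ret ↔ y ∈ d.values := fun y => hret ▸ PySem.List.mem_sorted d.values (fun x => x) false y
    -- ret[0] = lo
    have h0 : PySem.List.pyGet? ret 0 = some lo := by
      cases hc : ret with
      | nil => exact absurd hc hretne
      | cons m t =>
        have hm_le : ∀ y ∈ d.values, m ≤ y := PySem.List.key_head_sorted_le d.values (fun x => x) (hret.symm ▸ hc)
        have hmv : m ∈ d.values := (hmemret m).mp (by simp [hc])
        have : m = lo := le_antisymm (hm_le lo hloMem) (hloMin m hmv)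
        simp [this]
    -- ret[-1] = hi
    have hlast : PySem.List.pyGet? ret (-1) = some hi := by
      rw [PySem.List.pyGet?_neg_one]
      have hlen : 0 < ret.length := List.length_pos_iff.mpr hretne
      have hgl : ret.getLast? = some (ret[ret.length - 1]) := by
        rw [List.getLast?_eq_getElem?]
        exact List.getElem?_eq_getElem (by omega)
      rw [hgl]
      have hlm : ret[ret.length - 1] ∈ d.values :=
        (hmemret _).mp (List.getElem_mem _)
      have hle : ret[ret.length - 1] ≤ hi := hhiMax _ hlm
      have hge : hi ≤ ret[ret.length - 1] := by
        obtain ⟨p, hp, hpe⟩ := List.getElem_of_mem ((hmemret hi).mpr hhiMem)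
        calc hi = ret[p] := hpe.symm
          _ ≤ ret[ret.length - 1] := by
            have := PySem.List.sorted_id_getElem_mono (xs := d.values)
              (p := p) (q := ret.length - 1) (by omega) (by rw [hret]; omega)
            simpa [hret] using this
      exact congrArg some (le_antisymm hle hge)
    -- the fold over keys is the counting fold over values
    have hvals : d.values = d.keys.map (fun k => d.getD k 0) :=
      PySem.Dict.values_eq_map_keys d hnd 0
    simp only [h0, hlast, Option.any_some]
    rw [show (d.keys.foldl (fun (p : Int × Int) k =>
        if d.getD k 0 == hi then (p.1, p.2 + 1)
        else if d.getD k 0 == lo then (p.1 + 1, p.2) else p) ((0:Int), (0:Int)))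
      = (d.values.foldl (fun (p : Int × Int) v =>
        if v == hi then (p.1, p.2 + 1) else if v == lo then (p.1 + 1, p.2) else p) ((0:Int),(0:Int))) by
        rw [hvals, List.foldl_map]]
    rw [foldl_minmax, count_filter_ne]
    simp [hv, hmin, hmax]
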